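-- pv_equiv track=rewrite | github.com/KoyomiRei/maya-rig-controller-tool | maya_rct/maya_rct.py | fallback_up_vector
-- ===== SOURCE A (Python) =====
-- import math
--
-- DEFAULT_DIRECTION = "X"
--
-- DEFAULT_UP_VECTOR = "Y"
--
-- AXIS_VECTORS = {
--     "X": (1.0, 0.0, 0.0),
--     "-X": (-1.0, 0.0, 0.0),
--     "Y": (0.0, 1.0, 0.0),
--     "-Y": (0.0, -1.0, 0.0),
--     "Z": (0.0, 0.0, 1.0),
--     "-Z": (0.0, 0.0, -1.0),
-- }
--
-- def normalize_axis_name(value, default_value):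
--     normalized = (value or default_value).strip().upper()
--     if normalized in {"+X", "X+"}:
--         return "X"
--     if normalized in {"+Y", "Y+"}:
--         return "Y"
--     if normalized in {"+Z", "Z+"}:
--         return "Z"
--     return normalized if normalized in AXIS_VECTORS else default_value
--
-- def normalize_direction_name(direction):
--     return normalize_axis_name(direction, DEFAULT_DIRECTION)
--
-- def normalize_up_vector_name(up_vector):
--     return normalize_axis_name(up_vector, DEFAULT_UP_VECTOR)
--
-- def dot_product(vector_a, vector_b):
--     return vector_a[0] * vector_b[0] + vector_a[1] * vector_b[1] + vector_a[2] * vector_b[2]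
--
-- def vector_length(vector_value):
--     return math.sqrt(dot_product(vector_value, vector_value))
--
-- def normalize_vector(vector_value):
--     length = vector_length(vector_value)
--     if length < 1e-8:
--         return (0.0, 0.0, 0.0)
--     return (vector_value[0] / length, vector_value[1] / length, vector_value[2] / length)
--
-- def vectors_parallel(vector_a, vector_b, tolerance=0.9999):
--     vector_a = normalize_vector(vector_a)
--     vector_b = normalize_vector(vector_b)
--     return abs(dot_product(vector_a, vector_b)) >= tolerance
--
-- def fallback_up_vector(direction):
--     direction = normalize_direction_name(direction)
--     direction_vector = AXIS_VECTORS[direction]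
--     for candidate in (DEFAULT_UP_VECTOR, "Z", "X", "-Y", "-Z", "-X"):
--         candidate_name = normalize_up_vector_name(candidate)
--         if not vectors_parallel(direction_vector, AXIS_VECTORS[candidate_name]):
--             return candidate_name
--     return "Y"
-- ===== SOURCE B (Python) =====
-- DEFAULT_DIRECTION = "X"
--
-- AXIS_VECTORS = {
--     "X": (1.0, 0.0, 0.0),
--     "-X": (-1.0, 0.0, 0.0),
--     "Y": (0.0, 1.0, 0.0),
--     "-Y": (0.0, -1.0, 0.0),
--     "Z": (0.0, 0.0, 1.0),
--     "-Z": (0.0, 0.0, -1.0),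
-- }
--
-- def normalize_axis_name(value, default_value):
--     normalized = (value or default_value).strip().upper()
--     if normalized in {"+X", "X+"}:
--         return "X"
--     if normalized in {"+Y", "Y+"}:
--         return "Y"
--     if normalized in {"+Z", "Z+"}:
--         return "Z"
--     return normalized if normalized in AXIS_VECTORS else default_value
--
-- def fallback_up_vector(direction):
--     # All axis vectors are orthonormal, so the only candidate ever skipped as
--     # parallel is "Y" when the direction lies on the Y-axis; then "Z" is next.
--     direction = normalize_axis_name(direction, DEFAULT_DIRECTION)
--     return "Z" if direction in ("Y", "-Y") else "Y"
-- ===== Notes on version B (the rewrite author's own statement) =====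
-- stated objective: simpler
-- what changed: Replaced the candidate loop with its vector-parallelism tests by a closed-form branch on the normalized direction name: Y-axis directions map to "Z", all others to "Y".
import Mathlib
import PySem

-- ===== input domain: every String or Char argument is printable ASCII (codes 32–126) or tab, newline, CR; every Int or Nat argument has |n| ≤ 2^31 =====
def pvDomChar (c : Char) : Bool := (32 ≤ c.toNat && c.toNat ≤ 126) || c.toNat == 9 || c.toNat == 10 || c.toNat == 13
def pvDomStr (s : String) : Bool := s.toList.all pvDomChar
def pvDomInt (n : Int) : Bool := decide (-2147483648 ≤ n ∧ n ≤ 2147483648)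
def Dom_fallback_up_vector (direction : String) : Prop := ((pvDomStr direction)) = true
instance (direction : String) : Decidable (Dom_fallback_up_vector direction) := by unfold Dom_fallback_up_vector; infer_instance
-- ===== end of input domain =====

-- B replaces A's candidate loop with a closed-form branch on the normalized direction name (simpler).
-- Float note: AXIS_VECTORS only holds components 0.0/±1.0, so the vector arithmetic is ported
-- exactly with Int triples; 'abs(dot) >= 0.9999' on integer-valued dots is exactly '1 ≤ |dot|',
-- and normalize_vector is the identity on these unit vectors (length 1), zero on the zero vector.

-- ===== PORT A =====
def pvAxisVectors : PySem.Dict String (Int × Int × Int) :=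
  PySem.Dict.ofList [("X", (1, 0, 0)), ("-X", (-1, 0, 0)), ("Y", (0, 1, 0)),
                     ("-Y", (0, -1, 0)), ("Z", (0, 0, 1)), ("-Z", (0, 0, -1))]

def pvNormalizeAxisName (value default_value : String) : String :=
  let normalized := PySem.Str.upper (PySem.Str.strip (if value = "" then default_value else value))
  if normalized = "+X" ∨ normalized = "X+" then "X"
  else if normalized = "+Y" ∨ normalized = "Y+" then "Y"
  else if normalized = "+Z" ∨ normalized = "Z+" then "Z"
  else if (pvAxisVectors.contains normalized) then normalized else default_value

def pvNormalizeDirectionName (direction : String) : String :=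
  pvNormalizeAxisName direction "X"

def pvNormalizeUpVectorName (up_vector : String) : String :=
  pvNormalizeAxisName up_vector "Y"

def pvDot (a b : Int × Int × Int) : Int :=
  a.1 * b.1 + a.2.1 * b.2.1 + a.2.2 * b.2.2

-- normalize_vector: exact on integer axis vectors — length < 1e-8 iff the vector is zero,
-- and dividing a unit vector by its length 1 is the identity.
def pvNormalizeVector (v : Int × Int × Int) : Int × Int × Int :=
  if pvDot v v = 0 then (0, 0, 0) else v

-- vectors_parallel with tolerance 0.9999: on integer-valued dots this is exactly 1 ≤ |dot|.
def pvVectorsParallel (a b : Int × Int × Int) : Bool :=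
  let a := pvNormalizeVector a
  let b := pvNormalizeVector b
  1 ≤ (pvDot a b).natAbs

def pvFallbackLoop (dv : Int × Int × Int) : List String → String
  | [] => "Y"
  | c :: rest =>
      let candidate_name := pvNormalizeUpVectorName c
      if ¬ pvVectorsParallel dv ((pvAxisVectors.get? candidate_name).getD (0, 0, 0)) then
        candidate_name
      else pvFallbackLoop dv rest

def fallback_up_vector (direction : String) : String :=
  let direction := pvNormalizeDirectionName direction
  let direction_vector := (pvAxisVectors.get? direction).getD (0, 0, 0)  -- key always present after normalization
  pvFallbackLoop direction_vector ["Y", "Z", "X", "-Y", "-Z", "-X"]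

-- ===== PORT B =====
def pvAxisVectorsB : PySem.Dict String (Int × Int × Int) :=
  PySem.Dict.ofList [("X", (1, 0, 0)), ("-X", (-1, 0, 0)), ("Y", (0, 1, 0)),
                     ("-Y", (0, -1, 0)), ("Z", (0, 0, 1)), ("-Z", (0, 0, -1))]

def pvNormalizeAxisNameB (value default_value : String) : String :=
  let normalized := PySem.Str.upper (PySem.Str.strip (if value = "" then default_value else value))
  if normalized = "+X" ∨ normalized = "X+" then "X"
  else if normalized = "+Y" ∨ normalized = "Y+" then "Y"
  else if normalized = "+Z" ∨ normalized = "Z+" then "Z"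
  else if (pvAxisVectorsB.contains normalized) then normalized else default_value

def fallback_up_vector_alt (direction : String) : String :=
  let direction := pvNormalizeAxisNameB direction "X"
  if direction = "Y" ∨ direction = "-Y" then "Z" else "Y"

-- ===== PRECONDITION & SPEC =====
def Spec_fallback_up_vector (direction : String) (out : String) : Prop := out = fallback_up_vector_alt direction
instance (direction : String) (out : String) : Decidable (Spec_fallback_up_vector direction out) := by unfold Spec_fallback_up_vector; infer_instance

-- ===== CLAIM (what is proved, stated in full; the proofs are below) =====
def Claim_equal_fallback_up_vector : Prop := ∀ (direction : String), Dom_fallback_up_vector direction → Spec_fallback_up_vector direction (fallback_up_vector direction)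

-- ===== LEMMAS AND PROOFS =====

-- The normalizers agree (same code, two names).
theorem normB_eq_normA (s : String) : pvNormalizeAxisNameB s "X" = pvNormalizeDirectionName s := by
  rfl

-- The normalized direction is one of the six axis names.
theorem norm_mem (s : String) :
    pvNormalizeDirectionName s ∈ ["X", "-X", "Y", "-Y", "Z", "-Z"] := by
  unfold pvNormalizeDirectionName pvNormalizeAxisName
  generalize (PySem.Str.upper (PySem.Str.strip (if s = "" then "X" else s))) = n
  dsimp only
  split_ifs with h1 h2 h3 h4
  · simp
  · simp
  · simp
  · -- contains n = true on the literal dict means n is one of the six keys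
    rw [pvAxisVectors, PySem.Dict.contains_eq_decide_mem_keys] at h4
    simp [PySem.Dict.ofList] at h4
    tauto
  · simp

-- On each of the six normalized names the two bodies agree.
theorem core_eq (n : String) (hn : n ∈ ["X", "-X", "Y", "-Y", "Z", "-Z"]) :
    pvFallbackLoop ((pvAxisVectors.get? n).getD (0, 0, 0)) ["Y", "Z", "X", "-Y", "-Z", "-X"]
      = (if n = "Y" ∨ n = "-Y" then "Z" else "Y") := by
  fin_cases hn <;> decide

-- ===== VERDICT (by name: the statement is the Claim_ definition above) =====
theorem fallback_up_vector_spec : Claim_equal_fallback_up_vector := by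
  intro direction _
  unfold Spec_fallback_up_vector fallback_up_vector fallback_up_vector_alt
  rw [normB_eq_normA]
  exact core_eq _ (norm_mem direction)
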